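-- pv_equiv track=rewrite | github.com/arnaudbore/nf-neuro | docs/astro/formatting.py | sanitize_outside_codeblocks
-- ===== SOURCE A (Python) =====
-- _ESCAPE = {
--     "&": "&amp;",
--     "<": "&lt;",
--     ">": "&gt;",
--     '"': "&quot;",
--     "'": "&#39;",
--     "{": "\\{",
--     "}": "\\}"
-- }
--
-- def sanitize_outside_codeblocks(text, table_cell=False):
--     """Escape HTML-sensitive characters in markdown text, preserving code blocks.
--
--     Scans the text character by character, tracking whether we're inside
--     an inline code span (``...``) or a fenced code block (````` ... `````).
--     Only escapes ``&``, ``<``, ``>``, ``"``, ``'``, ``{`` and ``}`` when outside of code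
--     regions.
--
--     When *table_cell* is ``True`` (for content inside markdown table cells):
--
--     * Fenced code blocks (````` ... `````) are converted to
--       ``<code>...</code>``, with their internal newlines replaced by
--       ``<br />``.
--     * Newlines outside code blocks are replaced by ``<br />``.
--     """
--     result = []
--     i = 0
--     n = len(text)
--
--     while i < n:
--         # -- Fenced code block opening: ``` (with optional language tag) ----
--         if text[i] == "`" and i + 2 < n and text[i + 1] == "`" and text[i + 2] == "`":
--             end = text.find("```", i + 3)
--             if end != -1:
--                 content = text[i + 3 : end]
--                 if table_cell:
--                     # Strip optional language tag (first line)
--                     first_nl = content.find("\n")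
--                     lang = None
--                     if first_nl != -1:
--                         lang = content[:first_nl]
--                         content = content[first_nl + 1:]
--                     content = content.rstrip("\n")
--                     # Escape HTML inside <code> so it renders literally
--                     for char, entity in _ESCAPE.items():
--                         content = content.replace(char, entity)
--                     content = content.replace("\n", "<br />")
--                     tags = ""
--                     if lang:
--                         tags = f'lang="{lang}"'
--                     result.append(f"<pre><code {tags}>{content}</code></pre>")
--                 else:
--                     result.append(text[i : end + 3])
--                 i = end + 3
--             else:
--                 # Unclosed fenced block — treat rest of text as code
--                 if table_cell:
--                     content = text[i + 3:]
--                     first_nl = content.find("\n")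
--                     lang = None
--                     if first_nl != -1:
--                         lang = content[:first_nl]
--                         content = content[first_nl + 1:]
--                     content = content.rstrip("\n")
--                     for char, entity in _ESCAPE.items():
--                         content = content.replace(char, entity)
--                     content = content.replace("\n", "<br />")
--                     tags = ""
--                     if lang:
--                         tags = f'lang="{lang}"'
--                     result.append(f"<pre><code {tags}>{content}</code></pre>")
--                 else:
--                     result.append(text[i:])
--                 break
--
--         # -- Inline code span: `...` ----------------------------------------
--         elif text[i] == "`":
--             end = text.find("`", i + 1)
--             if end != -1:
--                 result.append(text[i : end + 1])
--                 i = end + 1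
--             else:
--                 result.append("`")
--                 i += 1
--
--         # -- Newline inside a table cell → <br /> ---------------------------
--         elif text[i] == "\n" and table_cell:
--             result.append("<br />")
--             i += 1
--
--         # -- Regular character: escape when outside code --------------------
--         else:
--             result.append(_ESCAPE.get(text[i], text[i]))
--             i += 1
--
--     return "".join(result)
-- ===== SOURCE B (Python) =====
-- # B: two-phase re-implementation — tokenize the text into fenced/inline/lone/plain
-- # tokens with str.partition/str.find (no index arithmetic), then render each token.
--
-- _ESCAPE = {
--     "&": "&amp;",
--     "<": "&lt;",
--     ">": "&gt;",
--     '"': "&quot;",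
--     "'": "&#39;",
--     "{": "\\{",
--     "}": "\\}",
-- }
--
--
-- def _esc(c, table_cell):
--     if c == "\n" and table_cell:
--         return "<br />"
--     return _ESCAPE.get(c, c)
--
--
-- def _render_fenced(content):
--     if "\n" in content:
--         lang, _, content = content.partition("\n")
--     else:
--         lang = ""
--     content = content.rstrip("\n")
--     for char, entity in _ESCAPE.items():
--         content = content.replace(char, entity)
--     content = content.replace("\n", "<br />")
--     tags = f'lang="{lang}"' if lang else ""
--     return f"<pre><code {tags}>{content}</code></pre>"
--
--
-- def _tokenize(text):
--     toks = []
--     s = text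
--     while s:
--         if s.startswith("```"):
--             body, sep, rest = s[3:].partition("```")
--             toks.append(("fenced", body, sep != ""))
--             s = rest
--         elif s.startswith("`"):
--             body, sep, rest = s[1:].partition("`")
--             if sep:
--                 toks.append(("inline", body))
--                 s = rest
--             else:
--                 toks.append(("lone",))
--                 s = s[1:]
--         else:
--             j = s.find("`")
--             if j == -1:
--                 toks.append(("plain", s))
--                 s = ""
--             else:
--                 toks.append(("plain", s[:j]))
--                 s = s[j:]
--     return toks
--
--
-- def _render(tok, table_cell):
--     kind = tok[0]
--     if kind == "fenced":
--         _, body, closed = tok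
--         if table_cell:
--             return _render_fenced(body)
--         return "```" + body + ("```" if closed else "")
--     if kind == "inline":
--         return "`" + tok[1] + "`"
--     if kind == "lone":
--         return "`"
--     return "".join(_esc(c, table_cell) for c in tok[1])
--
--
-- def sanitize_outside_codeblocks(text, table_cell=False):
--     return "".join(_render(t, table_cell) for t in _tokenize(text))
-- ===== Notes on version B (the rewrite author's own statement) =====
-- stated objective: alternative
-- what changed: Replaced A's single-pass index-arithmetic state machine with a two-phase design: a tokenizer that splits the text into fenced/inline/lone-backtick/plain tokens using str.partition and str.find on suffixes, and a separate renderer mapped over the token list.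
import Mathlib
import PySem

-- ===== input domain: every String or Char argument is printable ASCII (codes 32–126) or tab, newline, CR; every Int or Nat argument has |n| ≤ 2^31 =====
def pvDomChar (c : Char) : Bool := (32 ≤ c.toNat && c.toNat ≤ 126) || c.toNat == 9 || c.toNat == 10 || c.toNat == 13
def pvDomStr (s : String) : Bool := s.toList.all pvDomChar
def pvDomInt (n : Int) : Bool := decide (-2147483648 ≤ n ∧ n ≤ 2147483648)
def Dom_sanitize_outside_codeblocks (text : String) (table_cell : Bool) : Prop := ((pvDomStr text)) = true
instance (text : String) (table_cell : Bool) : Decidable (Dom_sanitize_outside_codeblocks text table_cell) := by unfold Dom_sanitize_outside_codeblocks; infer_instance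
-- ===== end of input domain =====

-- B replaces A's single-pass index-arithmetic state machine by a tokenizer
-- (fenced / inline / lone-backtick / plain tokens, via partition/find on suffixes)
-- followed by a renderer mapped over the token list; same output (objective: alternative).

-- the module constant _ESCAPE (dict → association list, insertion order)
def escapeItems : List (Char × List Char) :=
  [('&', ['&','a','m','p',';']),
   ('<', ['&','l','t',';']),
   ('>', ['&','g','t',';']),
   ('"', ['&','q','u','o','t',';']),
   ('\'', ['&','#','3','9',';']),
   ('{', ['\\','{']),
   ('}', ['\\','}'])]

-- exact port of str.rstrip("\n") (strip trailing newlines), used by both sides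
def rstripNl (s : List Char) : List Char := (s.reverse.dropWhile (fun c => c == '\n')).reverse

-- ===== PORT A =====
-- A's fenced-content processing for table cells (this block appears verbatim twice in A,
-- for the closed and the unclosed fence; it is transliterated once and called at both sites)
def processFencedA (content : List Char) : List Char :=
  let first_nl := PySem.Chars.find content ['\n']
  let p := if first_nl ≠ -1 then
      (some (PySem.List.slice content none (some first_nl)),
       PySem.List.slice content (some (first_nl + 1)) none)
    else (none, content)
  let content := rstripNl p.2
  let content := escapeItems.foldl (fun s q => PySem.Chars.replace s [q.1] q.2) content
  let content := PySem.Chars.replace content ['\n'] ['<','b','r',' ','/','>']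
  let tags := match p.1 with
    | some l => if l ≠ [] then ['l','a','n','g','=','"'] ++ l ++ ['"'] else []
    | none => []
  ['<','p','r','e','>','<','c','o','d','e',' '] ++ tags ++ ['>'] ++ content ++
    ['<','/','c','o','d','e','>','<','/','p','r','e','>']

-- the while-loop of A: index i over text, result accumulated (strings joined = char append).
-- The fuel parameter is only a structural totality guard: i grows by at least 1 per iteration,
-- so length+1 units of fuel are never exhausted.
def sanitizeLoop (chars : List Char) (table_cell : Bool) : Nat → Nat → List Char → List Char
  | 0, _, acc => acc
  | fuel + 1, i, acc =>
    if hi : i < chars.length then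
      if hf : chars[i] = '`' ∧ i + 2 < chars.length ∧ chars[i+1]! = '`' ∧ chars[i+2]! = '`' then
        -- end = text.find("```", i + 3)
        if PySem.Chars.findFrom chars ['`','`','`'] ((i+3 : Nat) : Int) ≠ -1 then
          sanitizeLoop chars table_cell fuel
            ((PySem.Chars.findFrom chars ['`','`','`'] ((i+3 : Nat) : Int)).toNat + 3)
            (acc ++
              (if table_cell then
                processFencedA (PySem.List.slice chars (some ((i+3 : Nat) : Int))
                  (some (PySem.Chars.findFrom chars ['`','`','`'] ((i+3 : Nat) : Int))))
              else PySem.List.slice chars (some (i : Int))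
                (some (PySem.Chars.findFrom chars ['`','`','`'] ((i+3 : Nat) : Int) + 3))))
        else
          -- unclosed fenced block: process the rest and break
          acc ++
            (if table_cell then
              processFencedA (PySem.List.slice chars (some ((i+3 : Nat) : Int)) none)
            else PySem.List.slice chars (some (i : Int)) none)
      else if chars[i] = '`' then
        -- end = text.find("`", i + 1)
        if PySem.Chars.findFrom chars ['`'] ((i+1 : Nat) : Int) ≠ -1 then
          sanitizeLoop chars table_cell fuel
            ((PySem.Chars.findFrom chars ['`'] ((i+1 : Nat) : Int)).toNat + 1)
            (acc ++ PySem.List.slice chars (some (i : Int))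
              (some (PySem.Chars.findFrom chars ['`'] ((i+1 : Nat) : Int) + 1)))
        else
          sanitizeLoop chars table_cell fuel (i + 1) (acc ++ ['`'])
      else if chars[i] = '\n' ∧ table_cell = true then
        sanitizeLoop chars table_cell fuel (i + 1) (acc ++ ['<','b','r',' ','/','>'])
      else
        sanitizeLoop chars table_cell fuel (i + 1) (acc ++ ((escapeItems.lookup chars[i]).getD [chars[i]]))
    else acc

def sanitize_outside_codeblocks (text : String) (table_cell : Bool) : String :=
  String.ofList (sanitizeLoop text.toList table_cell (text.toList.length + 1) 0 [])

-- ===== PORT B =====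
-- exact port of str.partition (nonempty separator), via str.find
def pyPartition (s sep : List Char) : List Char × Bool × List Char :=
  let j := PySem.Chars.find s sep
  if j = -1 then (s, false, [])
  else (s.take j.toNat, true, s.drop (j.toNat + sep.length))

inductive MdTok where
  | fenced : List Char → Bool → MdTok
  | inlineCode : List Char → MdTok
  | lone : MdTok
  | plain : List Char → MdTok

-- used by tokenize's termination proof
theorem pyPartition_rest_len (s sep : List Char) : (pyPartition s sep).2.2.length ≤ s.length := by
  unfold pyPartition
  by_cases h : PySem.Chars.find s sep = -1 <;> simp [h]

def tokenize (s : List Char) : List MdTok :=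
  if hs : s = [] then []
  else if h3 : PySem.Chars.startswith s ['`','`','`'] then
    let p := pyPartition (s.drop 3) ['`','`','`']
    MdTok.fenced p.1 p.2.1 :: tokenize p.2.2
  else if h1 : PySem.Chars.startswith s ['`'] then
    let p := pyPartition (s.drop 1) ['`']
    if p.2.1 then MdTok.inlineCode p.1 :: tokenize p.2.2
    else MdTok.lone :: tokenize (s.drop 1)
  else
    if hj : PySem.Chars.find s ['`'] = -1 then [MdTok.plain s]
    else MdTok.plain (s.take (PySem.Chars.find s ['`']).toNat)
         :: tokenize (s.drop (PySem.Chars.find s ['`']).toNat)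
termination_by s.length
decreasing_by
  · have hl : 0 < s.length := List.length_pos_iff.mpr hs
    have := pyPartition_rest_len (s.drop 3) ['`','`','`']
    simp only [List.length_drop] at this
    omega
  · have hl : 0 < s.length := List.length_pos_iff.mpr hs
    have := pyPartition_rest_len (s.drop 1) ['`']
    simp only [List.length_drop] at this
    omega
  · have hl : 0 < s.length := List.length_pos_iff.mpr hs
    simp
    omega
  · have hl : 0 < s.length := List.length_pos_iff.mpr hs
    have h0 : 0 ≤ PySem.Chars.find s ['`'] := by
      have := PySem.Chars.neg_one_le_find s ['`']
      omega
    have hpre := (PySem.Chars.find_spec h0).1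
    have hnz : (PySem.Chars.find s ['`']).toNat ≠ 0 := by
      intro h
      rw [h] at hpre
      simp only [List.drop_zero] at hpre
      exact h1 ((PySem.Chars.startswith_iff s ['`']).mpr hpre)
    simp
    omega

-- _esc: per-character escaping
def escChar (c : Char) (table_cell : Bool) : List Char :=
  if c = '\n' ∧ table_cell = true then ['<','b','r',' ','/','>']
  else (escapeItems.lookup c).getD [c]

-- _render_fenced
def renderFenced (content : List Char) : List Char :=
  let p := if PySem.Chars.isIn ['\n'] content
    then (let q := pyPartition content ['\n']; (q.1, q.2.2))
    else ([], content)
  let content := rstripNl p.2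
  let content := escapeItems.foldl (fun s q => PySem.Chars.replace s [q.1] q.2) content
  let content := PySem.Chars.replace content ['\n'] ['<','b','r',' ','/','>']
  let tags := if p.1 ≠ [] then ['l','a','n','g','=','"'] ++ p.1 ++ ['"'] else []
  ['<','p','r','e','>','<','c','o','d','e',' '] ++ tags ++ ['>'] ++ content ++
    ['<','/','c','o','d','e','>','<','/','p','r','e','>']

-- _render
def renderTok (t : MdTok) (table_cell : Bool) : List Char :=
  match t with
  | .fenced body closed =>
      if table_cell then renderFenced body
      else ['`','`','`'] ++ body ++ (if closed then ['`','`','`'] else [])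
  | .inlineCode body => ['`'] ++ body ++ ['`']
  | .lone => ['`']
  | .plain run => (run.map (fun c => escChar c table_cell)).flatten

def sanitize_outside_codeblocks_alt (text : String) (table_cell : Bool) : String :=
  String.ofList (((tokenize text.toList).map (fun t => renderTok t table_cell)).flatten)

-- ===== PRECONDITION & SPEC =====
def Spec_sanitize_outside_codeblocks (text : String) (table_cell : Bool) (out : String) : Prop := out = sanitize_outside_codeblocks_alt text table_cell
instance (text : String) (table_cell : Bool) (out : String) : Decidable (Spec_sanitize_outside_codeblocks text table_cell out) := by unfold Spec_sanitize_outside_codeblocks; infer_instance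

-- ===== CLAIM (what is proved, stated in full; the proofs are below) =====
def Claim_equal_sanitize_outside_codeblocks : Prop := ∀ (text : String) (table_cell : Bool), Dom_sanitize_outside_codeblocks text table_cell → Spec_sanitize_outside_codeblocks text table_cell (sanitize_outside_codeblocks text table_cell)

-- ===== LEMMAS AND PROOFS =====

def renderAll (s : List Char) (tc : Bool) : List Char :=
  ((tokenize s).map (fun t => renderTok t tc)).flatten

theorem tokenize_nil : tokenize [] = [] := by
  rw [tokenize]
  rfl

theorem renderAll_nil (tc : Bool) : renderAll [] tc = [] := by
  simp [renderAll, tokenize_nil]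

-- find points at the first occurrence: the converse characterization
theorem find_eq_of_first (s sub : List Char) (k : Nat)
    (hpre : sub <+: s.drop k) (hmin : ∀ j < k, ¬ sub <+: s.drop j) :
    PySem.Chars.find s sub = (k : Int) := by
  have hinf : sub <:+: s := hpre.isInfix.trans (s.drop_suffix k).isInfix
  have h0 : 0 ≤ PySem.Chars.find s sub := (PySem.Chars.find_nonneg_iff s sub).mpr hinf
  obtain ⟨h1, h2⟩ := PySem.Chars.find_spec h0
  have hk1 : ¬ (PySem.Chars.find s sub).toNat < k := fun hlt => hmin _ hlt h1
  have hk2 : ¬ k < (PySem.Chars.find s sub).toNat := fun hlt => h2 _ hlt hpre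
  omega

-- shifting a find across a head that starts no occurrence
theorem find_cons_shift {c : Char} {rest sub : List Char} (h : ¬ sub <+: (c :: rest)) :
    PySem.Chars.find (c :: rest) sub =
      if PySem.Chars.find rest sub = -1 then -1 else PySem.Chars.find rest sub + 1 := by
  by_cases hr : PySem.Chars.find rest sub = -1
  · rw [if_pos hr, PySem.Chars.find_eq_neg_one_iff]
    intro hinf
    have hex : ∃ j, sub <+: (c :: rest).drop j := by
      rw [PySem.Chars.exists_prefix_drop_iff_isIn, PySem.Chars.isIn_iff_infix]
      exact hinf
    obtain ⟨j, hj⟩ := hex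
    cases j with
    | zero => exact h (by simpa using hj)
    | succ j' =>
      have hj' : sub <+: rest.drop j' := by simpa using hj
      exact (PySem.Chars.find_eq_neg_one_iff rest sub).mp hr
        (hj'.isInfix.trans (rest.drop_suffix j').isInfix)
  · rw [if_neg hr]
    have h0 : 0 ≤ PySem.Chars.find rest sub := by
      have := PySem.Chars.neg_one_le_find rest sub
      omega
    obtain ⟨h1, h2⟩ := PySem.Chars.find_spec h0
    have heq := find_eq_of_first (c :: rest) sub ((PySem.Chars.find rest sub).toNat + 1)
      (by simpa using h1)
      (by
        intro j hj
        cases j with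
        | zero => simpa using h
        | succ j' =>
          simp only [List.drop_succ_cons]
          exact h2 j' (by omega))
    rw [heq]
    omega

-- taking past a known occurrence
theorem take_add_of_prefix {l sub : List Char} {j : Nat} (h : sub <+: l.drop j) :
    l.take (j + sub.length) = l.take j ++ sub := by
  rw [List.take_add]
  obtain ⟨t, ht⟩ := h
  rw [← ht, List.take_left]

-- A's fenced-opening test, read off a prefix of the suffix
theorem fenced_cond_of_prefix {chars : List Char} {i : Nat}
    (hi : i < chars.length) (h : ['`','`','`'] <+: chars.drop i) :
    chars[i] = '`' ∧ i + 2 < chars.length ∧ chars[i+1]! = '`' ∧ chars[i+2]! = '`' := by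
  obtain ⟨r, hr⟩ := h
  simp only [List.cons_append, List.nil_append] at hr
  have hlen : chars.length - i = 3 + r.length := by
    have := congrArg List.length hr
    simp only [List.length_drop, List.length_cons] at this
    omega
  have h2 : i + 2 < chars.length := by omega
  have h1 : i + 1 < chars.length := by omega
  rw [List.drop_eq_getElem_cons hi] at hr
  rw [List.drop_eq_getElem_cons h1, List.drop_eq_getElem_cons h2] at hr
  simp only [List.cons.injEq] at hr
  refine ⟨hr.1.symm, h2, ?_, ?_⟩
  · rw [getElem!_pos chars (i+1) h1]
    exact hr.2.1.symm
  · rw [getElem!_pos chars (i+2) h2]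
    exact hr.2.2.1.symm

theorem prefix_of_fenced_cond {chars : List Char} {i : Nat}
    (hi : i < chars.length)
    (h : chars[i] = '`' ∧ i + 2 < chars.length ∧ chars[i+1]! = '`' ∧ chars[i+2]! = '`') :
    chars.drop i = '`' :: '`' :: '`' :: chars.drop (i+3) := by
  obtain ⟨hc0, h2, hc1, hc2⟩ := h
  have h1 : i + 1 < chars.length := by omega
  rw [List.drop_eq_getElem_cons hi, List.drop_eq_getElem_cons h1, List.drop_eq_getElem_cons h2]
  rw [getElem!_pos chars (i+1) h1] at hc1
  rw [getElem!_pos chars (i+2) h2] at hc2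
  rw [hc0, hc1, hc2]

-- a backtick-free string is a single plain token
theorem renderAll_no_backtick {s : List Char} (tc : Bool)
    (h : PySem.Chars.find s ['`'] = -1) :
    renderAll s tc = (s.map (fun c => escChar c tc)).flatten := by
  cases s with
  | nil => simp [renderAll_nil]
  | cons c t =>
    have hninf : ¬ ['`'] <:+: (c :: t) := (PySem.Chars.find_eq_neg_one_iff _ _).mp h
    have hc : c ≠ '`' := by
      intro hc
      exact hninf (by rw [hc]; exact ⟨[], t, rfl⟩)
    have h3 : PySem.Chars.startswith (c :: t) ['`','`','`'] = false := by
      rw [Bool.eq_false_iff]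
      intro hsw
      have := (PySem.Chars.startswith_iff _ _).mp hsw
      obtain ⟨r, hr⟩ := this
      simp only [List.cons_append, List.cons.injEq] at hr
      exact hc hr.1.symm
    have h1 : PySem.Chars.startswith (c :: t) ['`'] = false := by
      rw [Bool.eq_false_iff]
      intro hsw
      have := (PySem.Chars.startswith_iff _ _).mp hsw
      obtain ⟨r, hr⟩ := this
      simp only [List.cons_append, List.cons.injEq] at hr
      exact hc hr.1.symm
    rw [renderAll, tokenize]
    simp only [reduceDIte, h3, h1, Bool.false_eq_true, h, dite_true]
    simp [renderTok]

-- prepending one plain (non-backtick) character to the rendering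
theorem renderAll_cons_plain {c : Char} {t : List Char} (tc : Bool) (hc : c ≠ '`') :
    renderAll (c :: t) tc = escChar c tc ++ renderAll t tc := by
  have hnp : ¬ ['`'] <+: (c :: t) := by
    intro hp
    obtain ⟨r, hr⟩ := hp
    simp only [List.cons_append, List.nil_append, List.cons.injEq] at hr
    exact hc hr.1.symm
  have h3 : PySem.Chars.startswith (c :: t) ['`','`','`'] = false := by
    rw [Bool.eq_false_iff]
    intro hsw
    obtain ⟨r, hr⟩ := (PySem.Chars.startswith_iff _ _).mp hsw
    simp only [List.cons_append, List.cons.injEq] at hr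
    exact hc hr.1.symm
  have h1 : PySem.Chars.startswith (c :: t) ['`'] = false := by
    rw [Bool.eq_false_iff]
    intro hsw
    obtain ⟨r, hr⟩ := (PySem.Chars.startswith_iff _ _).mp hsw
    simp only [List.cons_append, List.cons.injEq] at hr
    exact hc hr.1.symm
  have hshift := find_cons_shift hnp
  by_cases hr : PySem.Chars.find t ['`'] = -1
  · have hct : PySem.Chars.find (c :: t) ['`'] = -1 := by rw [hshift, if_pos hr]
    rw [renderAll_no_backtick tc hct, renderAll_no_backtick tc hr]
    simp
  · rw [if_neg hr] at hshift
    have h0 : 0 ≤ PySem.Chars.find t ['`'] := by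
      have := PySem.Chars.neg_one_le_find t ['`']
      omega
    have hctne : ¬ PySem.Chars.find (c :: t) ['`'] = -1 := by omega
    have htn : (PySem.Chars.find (c :: t) ['`']).toNat
        = (PySem.Chars.find t ['`']).toNat + 1 := by omega
    rw [renderAll, tokenize]
    simp only [reduceDIte, h3, h1, Bool.false_eq_true]
    rw [dif_neg (show ¬ (c :: t = []) by simp), dif_neg hctne, htn,
      List.take_succ_cons, List.drop_succ_cons]
    rcases Nat.eq_zero_or_pos (PySem.Chars.find t ['`']).toNat with hz | hpos
    · rw [hz]
      simp only [List.take_zero, List.drop_zero]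
      simp [renderAll, renderTok]
    · obtain ⟨h1t, h2t⟩ := PySem.Chars.find_spec h0
      have htne : t ≠ [] := by
        rintro rfl
        simp at h1t
      have hhd : ¬ ['`'] <+: t := fun hp => h2t 0 (by omega) (by simpa using hp)
      have h3t : PySem.Chars.startswith t ['`','`','`'] = false := by
        rw [Bool.eq_false_iff]
        intro hsw
        obtain ⟨r, hr2⟩ := (PySem.Chars.startswith_iff _ _).mp hsw
        exact hhd ⟨'`' :: '`' :: r, by rw [← hr2]; rfl⟩
      have h1t' : PySem.Chars.startswith t ['`'] = false := by
        rw [Bool.eq_false_iff]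
        intro hsw
        exact hhd ((PySem.Chars.startswith_iff _ _).mp hsw)
      conv_rhs => rw [renderAll, tokenize]
      simp only [reduceDIte, h3t, h1t', Bool.false_eq_true]
      rw [dif_neg htne, dif_neg hr]
      simp [renderAll, renderTok]

theorem not_startswith3 {chars : List Char} {i : Nat} (hi : i < chars.length)
    (hnf : ¬ (chars[i] = '`' ∧ i + 2 < chars.length ∧ chars[i+1]! = '`' ∧ chars[i+2]! = '`')) :
    PySem.Chars.startswith (chars.drop i) ['`','`','`'] = false := by
  rw [Bool.eq_false_iff]
  intro hsw
  exact hnf (fenced_cond_of_prefix hi ((PySem.Chars.startswith_iff _ _).mp hsw))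

theorem tokenize_backtick_unclosed {t : List Char}
    (h3 : PySem.Chars.startswith ('`' :: t) ['`','`','`'] = false)
    (hf : PySem.Chars.find t ['`'] = -1) :
    tokenize ('`' :: t) = MdTok.lone :: tokenize t := by
  rw [tokenize]
  have h1 : PySem.Chars.startswith ('`' :: t) ['`'] = true :=
    (PySem.Chars.startswith_iff _ _).mpr ⟨t, rfl⟩
  simp only [reduceDIte, h3, h1, Bool.false_eq_true, dite_true]
  simp [pyPartition, hf]

theorem tokenize_backtick_closed {t : List Char}
    (h3 : PySem.Chars.startswith ('`' :: t) ['`','`','`'] = false)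
    (hf : ¬ PySem.Chars.find t ['`'] = -1) :
    tokenize ('`' :: t) =
      MdTok.inlineCode (t.take (PySem.Chars.find t ['`']).toNat)
        :: tokenize (t.drop ((PySem.Chars.find t ['`']).toNat + 1)) := by
  rw [tokenize]
  have h1 : PySem.Chars.startswith ('`' :: t) ['`'] = true :=
    (PySem.Chars.startswith_iff _ _).mpr ⟨t, rfl⟩
  simp only [reduceDIte, h3, h1, Bool.false_eq_true, dite_true]
  simp [pyPartition, hf]

theorem tokenize_fenced_unclosed {r : List Char}
    (hf : PySem.Chars.find r ['`','`','`'] = -1) :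
    tokenize ('`' :: '`' :: '`' :: r) = [MdTok.fenced r false] := by
  rw [tokenize]
  have h3 : PySem.Chars.startswith ('`' :: '`' :: '`' :: r) ['`','`','`'] = true :=
    (PySem.Chars.startswith_iff _ _).mpr ⟨r, rfl⟩
  simp only [reduceDIte, h3, dite_true]
  simp [pyPartition, hf, tokenize_nil]

theorem tokenize_fenced_closed {r : List Char}
    (hf : ¬ PySem.Chars.find r ['`','`','`'] = -1) :
    tokenize ('`' :: '`' :: '`' :: r) =
      MdTok.fenced (r.take (PySem.Chars.find r ['`','`','`']).toNat) true
        :: tokenize (r.drop ((PySem.Chars.find r ['`','`','`']).toNat + 3)) := by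
  rw [tokenize]
  have h3 : PySem.Chars.startswith ('`' :: '`' :: '`' :: r) ['`','`','`'] = true :=
    (PySem.Chars.startswith_iff _ _).mpr ⟨r, rfl⟩
  simp only [reduceDIte, h3, dite_true]
  simp [pyPartition, hf]

theorem renderFenced_eq_pos (c : List Char) (hn : ¬ PySem.Chars.find c ['\n'] = -1) :
    renderFenced c =
      ['<','p','r','e','>','<','c','o','d','e',' '] ++
        (if c.take (PySem.Chars.find c ['\n']).toNat ≠ [] then
            ['l','a','n','g','=','"'] ++ c.take (PySem.Chars.find c ['\n']).toNat ++ ['"']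
          else []) ++ ['>'] ++
        PySem.Chars.replace
          (escapeItems.foldl (fun s q => PySem.Chars.replace s [q.1] q.2)
            (rstripNl (c.drop ((PySem.Chars.find c ['\n']).toNat + 1)))) ['\n']
          ['<','b','r',' ','/','>'] ++
        ['<','/','c','o','d','e','>','<','/','p','r','e','>'] := by
  have hin : PySem.Chars.isIn ['\n'] c = true := by
    rw [PySem.Chars.isIn_iff_infix]
    exact (PySem.Chars.find_ne_neg_one_iff c ['\n']).mp hn
  rw [renderFenced]
  simp only [hin, if_true, pyPartition, if_neg hn]
  rfl

theorem renderFenced_eq_neg (c : List Char) (hn : PySem.Chars.find c ['\n'] = -1) :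
    renderFenced c =
      ['<','p','r','e','>','<','c','o','d','e',' '] ++ ['>'] ++
        PySem.Chars.replace
          (escapeItems.foldl (fun s q => PySem.Chars.replace s [q.1] q.2) (rstripNl c)) ['\n']
          ['<','b','r',' ','/','>'] ++
        ['<','/','c','o','d','e','>','<','/','p','r','e','>'] := by
  have hin : PySem.Chars.isIn ['\n'] c = false := by
    rw [PySem.Chars.isIn_eq_false_iff]
    exact (PySem.Chars.find_eq_neg_one_iff c ['\n']).mp hn
  rw [renderFenced]
  simp [hin]

theorem processFencedA_eq (c : List Char) : processFencedA c = renderFenced c := by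
  rw [processFencedA]
  by_cases hn : PySem.Chars.find c ['\n'] = -1
  · rw [renderFenced_eq_neg c hn]
    simp [hn]
  · rw [renderFenced_eq_pos c hn]
    have hn0 : 0 ≤ PySem.Chars.find c ['\n'] := by
      have := PySem.Chars.neg_one_le_find c ['\n']
      omega
    have hsl1 : PySem.List.slice c none (some (PySem.Chars.find c ['\n']))
        = c.take (PySem.Chars.find c ['\n']).toNat := PySem.List.slice_to _ hn0
    have hsl2 : PySem.List.slice c (some (PySem.Chars.find c ['\n'] + 1)) none
        = c.drop ((PySem.Chars.find c ['\n']).toNat + 1) := by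
      rw [PySem.List.slice_from _ (by omega)]
      congr 1
      omega
    simp [hn, hsl1, hsl2]

theorem renderTok_fenced (b : List Char) (cl : Bool) (tc : Bool) :
    renderTok (MdTok.fenced b cl) tc
      = if tc = true then renderFenced b
        else ['`','`','`'] ++ b ++ (if cl = true then ['`','`','`'] else []) := rfl

theorem loop_eq_renderAll (chars : List Char) (tc : Bool) :
    ∀ (fuel i : Nat) (acc : List Char), chars.length ≤ i + fuel →
      sanitizeLoop chars tc fuel i acc = acc ++ renderAll (chars.drop i) tc := by
  intro fuel
  induction fuel with
  | zero =>
    intro i acc hle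
    rw [sanitizeLoop, List.drop_eq_nil_of_le (by omega), renderAll_nil, List.append_nil]
  | succ fuel ih =>
    intro i acc hle
    rw [sanitizeLoop]
    by_cases hi : i < chars.length
    · rw [dif_pos hi]
      by_cases hf : chars[i] = '`' ∧ i + 2 < chars.length ∧ chars[i+1]! = '`' ∧ chars[i+2]! = '`'
      · rw [dif_pos hf]
        by_cases he : PySem.Chars.findFrom chars ['`','`','`'] ((i+3 : Nat) : Int) ≠ -1
        · rw [if_pos he]
          have hd : chars.drop i = '`' :: '`' :: '`' :: chars.drop (i+3) := prefix_of_fenced_cond hi hf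
          have hk := PySem.Chars.findFrom_natCast chars ['`','`','`'] (i+3) (by omega)
          have hfr : ¬ PySem.Chars.find (chars.drop (i+3)) ['`','`','`'] = -1 := by
            intro hx
            rw [hk, if_pos hx] at he
            exact he rfl
          have hj0 : 0 ≤ PySem.Chars.find (chars.drop (i+3)) ['`','`','`'] := by
            have := PySem.Chars.neg_one_le_find (chars.drop (i+3)) ['`','`','`']
            omega
          have he2 : PySem.Chars.findFrom chars ['`','`','`'] ((i+3 : Nat) : Int)
              = ((i + 3 + (PySem.Chars.find (chars.drop (i+3)) ['`','`','`']).toNat : Nat) : Int) := by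
            rw [hk, if_neg hfr]
            push_cast
            omega
          have hle' : chars.length ≤ (PySem.Chars.findFrom chars ['`','`','`'] ((i+3 : Nat) : Int)).toNat + 3 + fuel := by
            rw [hk, if_neg hfr]
            omega
          rw [ih _ _ hle']
          rw [he2]
          have ht1 : (((i + 3 + (PySem.Chars.find (chars.drop (i+3)) ['`','`','`']).toNat : Nat) : Int)).toNat = i + 3 + (PySem.Chars.find (chars.drop (i+3)) ['`','`','`']).toNat := by omega
          rw [ht1]
          have hsc : PySem.List.slice chars (some ((i+3 : Nat) : Int)) (some ((i + 3 + (PySem.Chars.find (chars.drop (i+3)) ['`','`','`']).toNat : Nat) : Int))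
              = (chars.drop (i+3)).take (PySem.Chars.find (chars.drop (i+3)) ['`','`','`']).toNat := by
            rw [PySem.List.slice_natCast]
            congr 1
            omega
          have hpre3 := (PySem.Chars.find_spec hj0).1
          have htk3 : (chars.drop (i+3)).take ((PySem.Chars.find (chars.drop (i+3)) ['`','`','`']).toNat + 3)
              = (chars.drop (i+3)).take (PySem.Chars.find (chars.drop (i+3)) ['`','`','`']).toNat ++ ['`','`','`'] := take_add_of_prefix hpre3
          have hsl3 : PySem.List.slice chars (some ((i : Nat) : Int)) (some (((i + 3 + (PySem.Chars.find (chars.drop (i+3)) ['`','`','`']).toNat : Nat) : Int) + 3))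
              = '`' :: '`' :: '`' :: ((chars.drop (i+3)).take (PySem.Chars.find (chars.drop (i+3)) ['`','`','`']).toNat ++ ['`','`','`']) := by
            have hc3 : (((i + 3 + (PySem.Chars.find (chars.drop (i+3)) ['`','`','`']).toNat : Nat) : Int) + 3) = ((i + 3 + (PySem.Chars.find (chars.drop (i+3)) ['`','`','`']).toNat + 3 : Nat) : Int) := by
              push_cast
              ring
            rw [hc3, PySem.List.slice_natCast]
            have harith : i + 3 + (PySem.Chars.find (chars.drop (i+3)) ['`','`','`']).toNat + 3 - i = (PySem.Chars.find (chars.drop (i+3)) ['`','`','`']).toNat + 3 + 3 := by omega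
            rw [harith, hd, List.take_succ_cons, List.take_succ_cons, List.take_succ_cons, htk3]
          rw [hsl3, hsc]
          have hdr : chars.drop (i + 3 + (PySem.Chars.find (chars.drop (i+3)) ['`','`','`']).toNat + 3)
              = (chars.drop (i+3)).drop ((PySem.Chars.find (chars.drop (i+3)) ['`','`','`']).toNat + 3) := by
            rw [List.drop_drop]
            exact congrArg (fun n => chars.drop n) (by omega)
          rw [hdr]
          conv_rhs => rw [hd, renderAll, tokenize_fenced_closed hfr]
          by_cases htc : tc = true
          · subst htc
            simp only [renderTok_fenced, if_true, List.map_cons, List.flatten_cons]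
            rw [processFencedA_eq]
            simp [renderAll]
          · simp only [renderTok_fenced, htc, Bool.false_eq_true, if_false, List.map_cons,
              List.flatten_cons]
            simp [renderAll]


        · rw [if_neg he]
          have hd : chars.drop i = '`' :: '`' :: '`' :: chars.drop (i+3) := prefix_of_fenced_cond hi hf
          have hfr : PySem.Chars.find (chars.drop (i+3)) ['`','`','`'] = -1 := by
            by_cases hx : PySem.Chars.find (chars.drop (i+3)) ['`','`','`'] = -1
            · exact hx
            · exfalso
              apply he
              rw [PySem.Chars.findFrom_natCast chars ['`','`','`'] (i+3) (by omega), if_neg hx]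
              have := PySem.Chars.neg_one_le_find (chars.drop (i+3)) ['`','`','`']
              omega
          conv_rhs => rw [hd, renderAll, tokenize_fenced_unclosed hfr]
          have hsf3 : PySem.List.slice chars (some ((i+3 : Nat) : Int)) none = chars.drop (i+3) :=
            PySem.List.slice_from_natCast chars (i+3)
          have hsf0 : PySem.List.slice chars (some ((i : Nat) : Int)) none = chars.drop i :=
            PySem.List.slice_from_natCast chars i
          by_cases htc : tc = true
          · subst htc
            simp only [if_true, hsf3, renderTok_fenced, List.map_cons, List.map_nil, List.flatten]
            rw [processFencedA_eq]
            simp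
          · simp only [htc, if_false, Bool.false_eq_true, hsf0, renderTok_fenced, List.map_cons,
              List.map_nil, List.flatten]
            rw [hd]
            simp

      · rw [dif_neg hf]
        by_cases hb : chars[i] = '`'
        · rw [if_pos hb]
          by_cases he : PySem.Chars.findFrom chars ['`'] ((i+1 : Nat) : Int) ≠ -1
          · rw [if_pos he]
            have hd : chars.drop i = '`' :: chars.drop (i+1) := by
              rw [List.drop_eq_getElem_cons hi, hb]
            have hsw3 := not_startswith3 hi hf
            rw [hd] at hsw3
            have hk := PySem.Chars.findFrom_natCast chars ['`'] (i+1) (by omega)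
            have hfr : ¬ PySem.Chars.find (chars.drop (i+1)) ['`'] = -1 := by
              by_contra hx
              rw [hk, if_pos hx] at he
              exact he rfl
            have hj0 : 0 ≤ PySem.Chars.find (chars.drop (i+1)) ['`'] := by
              have := PySem.Chars.neg_one_le_find (chars.drop (i+1)) ['`']
              omega
            have hle' : chars.length ≤ (PySem.Chars.findFrom chars ['`'] ((i+1 : Nat) : Int)).toNat + 1 + fuel := by
              rw [hk, if_neg hfr]
              omega
            rw [ih _ _ hle']
            have he2 : PySem.Chars.findFrom chars ['`'] ((i+1 : Nat) : Int)
                = ((i + 1 + (PySem.Chars.find (chars.drop (i+1)) ['`']).toNat : Nat) : Int) := by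
              rw [hk, if_neg hfr]
              push_cast
              omega
            have hpre := (PySem.Chars.find_spec hj0).1
            have htake : (chars.drop (i+1)).take ((PySem.Chars.find (chars.drop (i+1)) ['`']).toNat + 1)
                = (chars.drop (i+1)).take (PySem.Chars.find (chars.drop (i+1)) ['`']).toNat ++ ['`'] :=
              take_add_of_prefix hpre
            rw [he2]
            have ht1 : (((i + 1 + (PySem.Chars.find (chars.drop (i+1)) ['`']).toNat : Nat) : Int)).toNat
                = i + 1 + (PySem.Chars.find (chars.drop (i+1)) ['`']).toNat := by omega
            rw [ht1]
            have hsl : PySem.List.slice chars (some (i : Int))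
                (some (((i + 1 + (PySem.Chars.find (chars.drop (i+1)) ['`']).toNat : Nat) : Int) + 1))
                = '`' :: ((chars.drop (i+1)).take (PySem.Chars.find (chars.drop (i+1)) ['`']).toNat ++ ['`']) := by
              have : (((i + 1 + (PySem.Chars.find (chars.drop (i+1)) ['`']).toNat : Nat) : Int) + 1)
                  = ((i + 1 + (PySem.Chars.find (chars.drop (i+1)) ['`']).toNat + 1 : Nat) : Int) := by push_cast; ring
              rw [this, PySem.List.slice_natCast]
              have harith : i + 1 + (PySem.Chars.find (chars.drop (i+1)) ['`']).toNat + 1 - i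
                  = (PySem.Chars.find (chars.drop (i+1)) ['`']).toNat + 1 + 1 := by omega
              rw [harith, hd, List.take_succ_cons, ← htake]
            rw [hsl]
            have hdr : chars.drop (i + 1 + (PySem.Chars.find (chars.drop (i+1)) ['`']).toNat + 1)
                = (chars.drop (i+1)).drop ((PySem.Chars.find (chars.drop (i+1)) ['`']).toNat + 1) := by
              rw [List.drop_drop]
              congr 1
            rw [hdr]
            conv_rhs => rw [hd, renderAll, tokenize_backtick_closed hsw3 hfr]
            simp [renderAll, renderTok]


          · rw [if_neg he]
            rw [ih _ _ (show chars.length ≤ i + 1 + fuel by omega)]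
            have hd : chars.drop i = '`' :: chars.drop (i+1) := by
              rw [List.drop_eq_getElem_cons hi, hb]
            have hsw3 := not_startswith3 hi hf
            rw [hd] at hsw3
            have hfr : PySem.Chars.find (chars.drop (i+1)) ['`'] = -1 := by
              have hk := PySem.Chars.findFrom_natCast chars ['`'] (i+1) (by omega)
              rw [hk] at he
              by_contra hx
              rw [if_neg hx] at he
              exact he (by
                have := PySem.Chars.neg_one_le_find (chars.drop (i+1)) ['`']
                omega)
            rw [hd]
            conv_rhs => rw [renderAll, tokenize_backtick_unclosed hsw3 hfr]
            simp [renderAll, renderTok]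

        · rw [if_neg hb]
          by_cases hnl : chars[i] = '\n' ∧ tc = true
          · rw [if_pos hnl]
            rw [ih _ _ (show chars.length ≤ i + 1 + fuel by omega), List.drop_eq_getElem_cons hi, renderAll_cons_plain tc hb]
            have he : escChar chars[i] tc = ['<', 'b', 'r', ' ', '/', '>'] := by
              rw [escChar, if_pos hnl]
            rw [he, List.append_assoc]

          · rw [if_neg hnl]
            rw [ih _ _ (show chars.length ≤ i + 1 + fuel by omega), List.drop_eq_getElem_cons hi, renderAll_cons_plain tc hb]
            have he : escChar chars[i] tc = (escapeItems.lookup chars[i]).getD [chars[i]] := by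
              rw [escChar, if_neg hnl]
            rw [he, List.append_assoc]

    · rw [dif_neg hi, List.drop_eq_nil_of_le (by omega), renderAll_nil, List.append_nil]

-- ===== VERDICT (by name: the statement is the Claim_ definition above) =====
theorem sanitize_outside_codeblocks_spec : Claim_equal_sanitize_outside_codeblocks := by
  intro text tc _
  unfold Spec_sanitize_outside_codeblocks sanitize_outside_codeblocks sanitize_outside_codeblocks_alt
  rw [loop_eq_renderAll text.toList tc (text.toList.length + 1) 0 [] (by omega)]
  rfl
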